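-- pv_equiv track=rewrite | github.com/cr0iss4nt/AOIS1 | usual_binary_operations.py | subtract_in_usual_binary
-- ===== SOURCE A (Python) =====
-- def subtract_in_usual_binary(number1: str, number2: str) -> str:
--     max_length = max(len(number1), len(number2))
--     binary1 = number1.zfill(max_length)
--     binary2 = number2.zfill(max_length)
--     extra = 0
--     result = []
--
--     for i in range(max_length - 1, -1, -1):
--         binary1_bit = int(binary1[i]) - extra
--         binary2_bit = int(binary2[i])
--         if binary1_bit < binary2_bit:
--             extra = 1
--             binary1_bit += 2
--         else:
--             extra = 0
--         result.append(str(binary1_bit - binary2_bit))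
--     return ''.join(result[::-1]).lstrip('0')
-- ===== SOURCE B (Python) =====
-- def subtract_in_usual_binary(number1: str, number2: str) -> str:
--     value1 = 0
--     for bit in number1:
--         value1 = 2 * value1 + int(bit)
--     value2 = 0
--     for bit in number2:
--         value2 = 2 * value2 + int(bit)
--     value = (value1 - value2) % (2 ** max(len(number1), len(number2)))
--     return format(value, 'b').lstrip('0')
-- ===== Notes on version B (the rewrite author's own statement) =====
-- stated objective: simpler
-- what changed: Replaces the digit-by-digit school borrow-subtraction loop over zero-padded reversed strings with evaluating both strings to integers, subtracting modulo 2**max_length, and formatting the result in binary.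
-- outside the precondition, e.g. on subtract_in_usual_binary('9', '5'): A returns '4', B returns ''
import Mathlib
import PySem

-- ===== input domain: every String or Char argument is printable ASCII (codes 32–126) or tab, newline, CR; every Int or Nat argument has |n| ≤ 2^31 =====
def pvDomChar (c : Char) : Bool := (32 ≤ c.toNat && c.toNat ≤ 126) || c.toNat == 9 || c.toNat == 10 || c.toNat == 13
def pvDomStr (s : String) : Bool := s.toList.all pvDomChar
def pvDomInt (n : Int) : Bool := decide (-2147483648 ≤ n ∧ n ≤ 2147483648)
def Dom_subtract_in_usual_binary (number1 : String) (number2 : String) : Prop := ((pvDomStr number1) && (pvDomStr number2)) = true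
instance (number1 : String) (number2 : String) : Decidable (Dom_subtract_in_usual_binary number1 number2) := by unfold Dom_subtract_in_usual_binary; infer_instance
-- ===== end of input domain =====

-- B replaces A's digit-by-digit borrow-subtraction loop by integer conversion, subtraction mod 2^max_length
-- and binary formatting (simpler, same cost).


-- ===== PORT A =====
-- int(c) for a single character: its digit value; exact on '0'..'9' (Pre_ admits only '0'/'1')
def pvIntOfDigit (c : Char) : Int := (c.toNat : Int) - 48

-- A's for-loop over i = max_length-1 … 0: a walk over the reversed zipped padded strings,
-- carrying 'extra' (the borrow) and 'result' (the appended digit strings)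
def pvSubLoop : List (Char × Char) → Int → List (List Char) → List (List Char)
  | [], _, result => result
  | (c1, c2) :: rest, extra, result =>
    let binary1_bit := pvIntOfDigit c1 - extra
    let binary2_bit := pvIntOfDigit c2
    if binary1_bit < binary2_bit then
      pvSubLoop rest 1 (result ++ [PySem.Int.toChars (binary1_bit + 2 - binary2_bit)])
    else
      pvSubLoop rest 0 (result ++ [PySem.Int.toChars (binary1_bit - binary2_bit)])

def subtract_in_usual_binary (number1 : String) (number2 : String) : String :=
  let max_length : Nat := max number1.toList.length number2.toList.length
  let binary1 := PySem.Chars.zfill number1.toList (max_length : Int)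
  let binary2 := PySem.Chars.zfill number2.toList (max_length : Int)
  let result := pvSubLoop (List.zip binary1.reverse binary2.reverse) 0 []
  -- ''.join(result[::-1]).lstrip('0'); .lstrip('0') drops the leading '0' characters (hand-ported, exact)
  String.ofList ((PySem.Chars.join [] result.reverse).dropWhile (· == '0'))

-- ===== PORT B =====
def subtract_in_usual_binary_alt (number1 : String) (number2 : String) : String :=
  let value1 := number1.toList.foldl (fun v bit => 2 * v + pvIntOfDigit bit) 0
  let value2 := number2.toList.foldl (fun v bit => 2 * v + pvIntOfDigit bit) 0
  let value := PySem.Int.mod (value1 - value2) (2 ^ (max number1.toList.length number2.toList.length))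
  -- format(value, 'b').lstrip('0'); .lstrip('0') drops the leading '0' characters (hand-ported, exact)
  String.ofList ((PySem.Int.toBinChars value).dropWhile (· == '0'))

-- ===== PRECONDITION & SPEC =====
-- Pre_ restricts to the function's natural domain, genuine binary strings: A raises ValueError on
-- non-digit characters, and on strings with decimal digits 2..9 it returns meaningless digit-wise
-- base-2-borrow strings outside the binary-subtraction domain, which B does not reproduce.
def Pre_subtract_in_usual_binary (number1 : String) (number2 : String) : Prop :=
  (number1.toList.all (fun c => c == '0' || c == '1')
    && number2.toList.all (fun c => c == '0' || c == '1')) = true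
instance (number1 : String) (number2 : String) : Decidable (Pre_subtract_in_usual_binary number1 number2) := by
  unfold Pre_subtract_in_usual_binary; infer_instance

def pvWitness_subtract_in_usual_binary : String × String := ("110", "011")

def Spec_subtract_in_usual_binary (number1 : String) (number2 : String) (out : String) : Prop :=
  out = subtract_in_usual_binary_alt number1 number2
instance (number1 : String) (number2 : String) (out : String) : Decidable (Spec_subtract_in_usual_binary number1 number2 out) := by
  unfold Spec_subtract_in_usual_binary; infer_instance

-- ===== CLAIM (what is proved, stated in full; the proofs are below) =====
def Claim_equal_subtract_in_usual_binary : Prop := ∀ (number1 : String) (number2 : String), Dom_subtract_in_usual_binary number1 number2 → Pre_subtract_in_usual_binary number1 number2 → Spec_subtract_in_usual_binary number1 number2 (subtract_in_usual_binary number1 number2)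

-- ===== LEMMAS AND PROOFS =====

-- bit value of a binary character
def pvBit (c : Char) : Nat := if c = '1' then 1 else 0

-- value of a most-significant-first binary digit list
def pvValM (l : List Char) : Nat := l.foldl (fun a c => 2 * a + pvBit c) 0

-- value of a least-significant-first binary digit list
def pvValL (l : List Char) : Nat := l.foldr (fun c a => 2 * a + pvBit c) 0

-- canonical binary digits, MSB first, [] for 0
def pvNatBin : Nat → List Char
  | 0 => []
  | n + 1 => pvNatBin ((n + 1) / 2) ++ [if (n + 1) % 2 = 1 then '1' else '0']
decreasing_by exact Nat.div_lt_self (Nat.succ_pos _) (by omega)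

def pvBinary (c : Char) : Prop := c = '0' ∨ c = '1'

lemma pvValM_foldl (l : List Char) (h : ∀ c ∈ l, pvBinary c) : ∀ a : Nat,
    l.foldl (fun v c => 2 * v + pvIntOfDigit c) (a : Int)
      = ((l.foldl (fun a c => 2 * a + pvBit c) a : Nat) : Int) := by
  induction l with
  | nil => intro a; simp
  | cons c t ih =>
    intro a
    have hc : pvBinary c := h c (by simp)
    have ht : ∀ x ∈ t, pvBinary x := fun x hx => h x (List.mem_cons_of_mem _ hx)
    have hval : (2 * (a : Int) + pvIntOfDigit c) = ((2 * a + pvBit c : Nat) : Int) := by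
      rcases hc with h' | h' <;> subst h' <;> simp [pvIntOfDigit, pvBit]
    simp only [List.foldl_cons, hval]
    exact ih ht _

lemma pvZfill_eq (l : List Char) (h : ∀ c ∈ l, pvBinary c) (w : Nat) :
    PySem.Chars.zfill l (w : Int) = List.replicate (w - l.length) '0' ++ l := by
  by_cases hw : w ≤ l.length
  · have : (w : Int) ≤ (l.length : Int) := by exact_mod_cast hw
    simp [PySem.Chars.zfill, this, Nat.sub_eq_zero_of_le hw]
  · have hlt : ¬ ((w : Int) ≤ (l.length : Int)) := by exact_mod_cast hw
    cases l with
    | nil =>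
      simp only [PySem.Chars.zfill]
      rw [if_neg hlt]
      simp
    | cons c t =>
      have hc : pvBinary c := h c (by simp)
      have hns : ¬ (c = '+' ∨ c = '-') := by rcases hc with h' | h' <;> subst h' <;> decide
      simp only [PySem.Chars.zfill]
      rw [if_neg hlt]
      simp [hns, Int.toNat_natCast]

lemma pvValM_replicate (k : Nat) (l : List Char) :
    pvValM (List.replicate k '0' ++ l) = pvValM l := by
  induction k with
  | zero => simp
  | succ n ih => simpa [pvValM, List.replicate_succ, pvBit] using ih

lemma pvValM_reverse (l : List Char) : pvValM l.reverse = pvValL l := by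
  simp [pvValM, pvValL, List.foldl_reverse]

lemma pvEmod_double (Z : Int) (n : Nat) (b : Int) (hb : b = 0 ∨ b = 1) :
    (b + 2 * Z) % 2 ^ (n + 1) = b + 2 * (Z % 2 ^ n) := by
  have hpos : (0 : Int) < 2 ^ n := by positivity
  have hz := Int.mul_ediv_add_emod Z (2 ^ n)
  have hsplit : b + 2 * Z = (b + 2 * (Z % 2 ^ n)) + 2 ^ (n + 1) * (Z / 2 ^ n) := by
    rw [pow_succ]; linarith [hz]
  rw [hsplit, Int.add_mul_emod_self_left]
  have h1 : 0 ≤ Z % 2 ^ n := Int.emod_nonneg Z (by positivity)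
  have h2 : Z % 2 ^ n < 2 ^ n := Int.emod_lt_of_pos Z hpos
  have : (2 : Int) ^ (n + 1) = 2 * 2 ^ n := by rw [pow_succ]; ring
  apply Int.emod_eq_of_lt <;> omega

lemma pvToChars_zero : PySem.Int.toChars 0 = ['0'] := by decide
lemma pvToChars_one : PySem.Int.toChars 1 = ['1'] := by decide

lemma pvValL_cons (c : Char) (t : List Char) : pvValL (c :: t) = 2 * pvValL t + pvBit c := by
  simp [pvValL]

-- generic cons step for the loop invariant
lemma pvCons (c1 c2 : Char) (rest : List (Char × Char)) (e e' : Int) (ch : Char)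
    (hch : pvBinary ch)
    (hstep : ∀ res, pvSubLoop ((c1, c2) :: rest) e res = pvSubLoop rest e' (res ++ [[ch]]))
    (hrel : (pvBit ch : Int) - 2 * e' = (pvBit c1 : Int) - e - pvBit c2)
    (IH : ∃ d : List Char, (∀ res, pvSubLoop rest e' res = res ++ d.map (fun c => [c])) ∧
      (∀ c ∈ d, pvBinary c) ∧
      (pvValL d : Int)
        = ((pvValL (rest.map Prod.fst) : Int) - (pvValL (rest.map Prod.snd) : Int) - e') % 2 ^ rest.length) :
    ∃ d : List Char, (∀ res, pvSubLoop ((c1, c2) :: rest) e res = res ++ d.map (fun c => [c])) ∧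
      (∀ c ∈ d, pvBinary c) ∧
      (pvValL d : Int)
        = ((pvValL (((c1, c2) :: rest).map Prod.fst) : Int)
            - (pvValL (((c1, c2) :: rest).map Prod.snd) : Int) - e) % 2 ^ ((c1, c2) :: rest).length := by
  obtain ⟨d, hd, hdb, hdv⟩ := IH
  refine ⟨ch :: d, ?_, ?_, ?_⟩
  · intro res
    rw [hstep, hd]
    simp
  · intro c hc
    rcases List.mem_cons.1 hc with h' | h'
    · exact h' ▸ hch
    · exact hdb c h'
  · have hb01 : (pvBit ch : Int) = 0 ∨ (pvBit ch : Int) = 1 := by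
      rcases hch with h' | h' <;> subst h' <;> simp [pvBit]
    have hnum : (pvValL (((c1, c2) :: rest).map Prod.fst) : Int)
        - (pvValL (((c1, c2) :: rest).map Prod.snd) : Int) - e
        = (pvBit ch : Int)
          + 2 * ((pvValL (rest.map Prod.fst) : Int) - (pvValL (rest.map Prod.snd) : Int) - e') := by
      simp only [List.map_cons, pvValL_cons]
      push_cast
      linarith [hrel]
    rw [List.length_cons, pvValL_cons, hnum, pvEmod_double _ _ _ hb01, ← hdv]
    push_cast
    ring

lemma pvSubLoop_spec : ∀ (zs : List (Char × Char)) (e : Int), (e = 0 ∨ e = 1) →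
    (∀ p ∈ zs, pvBinary p.1 ∧ pvBinary p.2) →
    ∃ d : List Char, (∀ res, pvSubLoop zs e res = res ++ d.map (fun c => [c])) ∧
      (∀ c ∈ d, pvBinary c) ∧
      (pvValL d : Int)
        = ((pvValL (zs.map Prod.fst) : Int) - (pvValL (zs.map Prod.snd) : Int) - e) % 2 ^ zs.length := by
  intro zs
  induction zs with
  | nil =>
    intro e he hb
    exact ⟨[], fun res => by simp [pvSubLoop], by simp, by simp [pvValL]⟩
  | cons p rest ih =>
    intro e he hb
    obtain ⟨c1, c2⟩ := p
    have h1 := (hb (c1, c2) (by simp)).1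
    have h2 := (hb (c1, c2) (by simp)).2
    have hrest : ∀ p ∈ rest, pvBinary p.1 ∧ pvBinary p.2 := fun p hp => hb p (List.mem_cons_of_mem _ hp)
    rcases h1 with h1 | h1 <;> rcases h2 with h2 | h2 <;> rcases he with he | he <;> subst h1 h2 he
    · exact pvCons _ _ _ _ 0 '0' (Or.inl rfl)
        (fun res => by simp [pvSubLoop, pvIntOfDigit, pvToChars_zero])
        (by simp [pvBit]) (ih 0 (Or.inl rfl) hrest)
    · exact pvCons _ _ _ _ 1 '1' (Or.inr rfl)
        (fun res => by simp [pvSubLoop, pvIntOfDigit, pvToChars_one])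
        (by simp [pvBit]) (ih 1 (Or.inr rfl) hrest)
    · exact pvCons _ _ _ _ 1 '1' (Or.inr rfl)
        (fun res => by simp [pvSubLoop, pvIntOfDigit, pvToChars_one])
        (by simp [pvBit]) (ih 1 (Or.inr rfl) hrest)
    · exact pvCons _ _ _ _ 1 '0' (Or.inl rfl)
        (fun res => by simp [pvSubLoop, pvIntOfDigit, pvToChars_zero])
        (by simp [pvBit]) (ih 1 (Or.inr rfl) hrest)
    · exact pvCons _ _ _ _ 0 '1' (Or.inr rfl)
        (fun res => by simp [pvSubLoop, pvIntOfDigit, pvToChars_one])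
        (by simp [pvBit]) (ih 0 (Or.inl rfl) hrest)
    · exact pvCons _ _ _ _ 0 '0' (Or.inl rfl)
        (fun res => by simp [pvSubLoop, pvIntOfDigit, pvToChars_zero])
        (by simp [pvBit]) (ih 0 (Or.inl rfl) hrest)
    · exact pvCons _ _ _ _ 0 '0' (Or.inl rfl)
        (fun res => by simp [pvSubLoop, pvIntOfDigit, pvToChars_zero])
        (by simp [pvBit]) (ih 0 (Or.inl rfl) hrest)
    · exact pvCons _ _ _ _ 1 '1' (Or.inr rfl)
        (fun res => by simp [pvSubLoop, pvIntOfDigit, pvToChars_one])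
        (by simp [pvBit]) (ih 1 (Or.inr rfl) hrest)

lemma pvNatBin_zero : pvNatBin 0 = [] := by rw [pvNatBin]

lemma pvNatBin_pos (n : Nat) (h : 0 < n) :
    pvNatBin n = pvNatBin (n / 2) ++ [if n % 2 = 1 then '1' else '0'] := by
  cases n with
  | zero => omega
  | succ m => rw [pvNatBin]

lemma pvValM_le_foldl (t : List Char) : ∀ a : Nat, a ≤ t.foldl (fun a c => 2 * a + pvBit c) a := by
  induction t with
  | nil => intro a; simp
  | cons c t ih => intro a; exact le_trans (by omega) (ih (2 * a + pvBit c))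

lemma pvValM_pos (t : List Char) : 0 < pvValM ('1' :: t) := by
  have := pvValM_le_foldl t 1
  simpa [pvValM, pvBit] using this

lemma pvValM_append_singleton (l : List Char) (c : Char) :
    pvValM (l ++ [c]) = 2 * pvValM l + pvBit c := by
  simp [pvValM, List.foldl_append]

lemma pvNatBin_val (l : List Char) :
    (∀ c ∈ l, pvBinary c) → l.head? = some '1' → pvNatBin (pvValM l) = l := by
  induction l using List.reverseRecOn with
  | nil => intro _ hh; simp at hh
  | append_singleton l' c ih =>
    intro hb hh
    have hc : pvBinary c := hb c (by simp)
    have hble : pvBit c ≤ 1 := by unfold pvBit; split <;> omega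
    cases l' with
    | nil =>
      have hc1 : c = '1' := by simpa using hh
      subst hc1
      have : pvValM ['1'] = 1 := by simp [pvValM, pvBit]
      rw [List.nil_append, this, pvNatBin_pos 1 one_pos]
      simp [pvNatBin_zero]
    | cons a t =>
      have hh' : (a :: t).head? = some '1' := by simpa using hh
      have ha : a = '1' := by simpa using hh'
      have hpos : 0 < pvValM (a :: t) := ha ▸ pvValM_pos t
      have hb' : ∀ x ∈ a :: t, pvBinary x := fun x hx =>
        hb x (by rw [List.cons_append]; exact List.mem_append_left _ hx)
      rw [pvValM_append_singleton]
      rw [pvNatBin_pos _ (by omega)]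
      have hdiv : (2 * pvValM (a :: t) + pvBit c) / 2 = pvValM (a :: t) := by omega
      have hmod : (2 * pvValM (a :: t) + pvBit c) % 2 = pvBit c := by omega
      rw [hdiv, hmod, ih hb' hh']
      congr 1
      rcases hc with h' | h' <;> subst h' <;> simp [pvBit]

lemma pvStrip_eq (l : List Char) (hb : ∀ c ∈ l, pvBinary c) :
    l.dropWhile (· == '0') = pvNatBin (pvValM l) := by
  induction l with
  | nil => simp [pvValM, pvNatBin_zero]
  | cons c t ih =>
    rcases hb c (by simp) with h' | h' <;> subst h'
    · have : pvValM ('0' :: t) = pvValM t := by simp [pvValM, pvBit]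
      simpa [List.dropWhile, this] using ih (fun x hx => hb x (List.mem_cons_of_mem _ hx))
    · rw [List.dropWhile_cons_of_neg (by decide)]
      exact (pvNatBin_val ('1' :: t) hb rfl).symm

lemma pvNatBin_head (n : Nat) (h : 0 < n) : ∃ t, pvNatBin n = '1' :: t := by
  induction n using Nat.strong_induction_on with
  | _ n ih =>
    rw [pvNatBin_pos n h]
    by_cases h2 : n / 2 = 0
    · have hn : n = 1 := by omega
      subst hn
      exact ⟨[], by simp [pvNatBin_zero]⟩
    · obtain ⟨t, ht⟩ := ih (n / 2) (Nat.div_lt_self h (by omega)) (by omega)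
      exact ⟨t ++ [if n % 2 = 1 then '1' else '0'], by rw [ht]; simp⟩

lemma pvToDigits_two (n : Nat) (h : 0 < n) : Nat.toDigits 2 n = pvNatBin n := by
  induction n using Nat.strong_induction_on with
  | _ n ih =>
    rw [Nat.toDigits_eq_if (by omega), pvNatBin_pos n h]
    by_cases hlt : n < 2
    · have hn : n = 1 := by omega
      subst hn
      simp [pvNatBin_zero, Nat.digitChar]
    · have hdiv : 0 < n / 2 := by omega
      rw [if_neg hlt, ih (n / 2) (Nat.div_lt_self h (by omega)) hdiv]
      congr 1
      have : n % 2 = 0 ∨ n % 2 = 1 := by omega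
      rcases this with h' | h' <;> simp [h', Nat.digitChar]

lemma pvToBin_strip (v : Int) (hv : 0 ≤ v) :
    (PySem.Int.toBinChars v).dropWhile (· == '0') = pvNatBin v.toNat := by
  have : ¬ v < 0 := by omega
  rw [PySem.Int.toBinChars, if_neg this]
  by_cases h0 : v.toNat = 0
  · rw [h0, Nat.toDigits_zero, pvNatBin_zero]; decide
  · rw [pvToDigits_two _ (by omega)]
    obtain ⟨t, ht⟩ := pvNatBin_head v.toNat (by omega)
    rw [ht, List.dropWhile_cons_of_neg (by decide)]

-- ===== VERDICT (by name: the statement is the Claim_ definition above) =====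
lemma pvFoldB (l : List Char) (h : ∀ c ∈ l, pvBinary c) :
    l.foldl (fun v bit => 2 * v + pvIntOfDigit bit) (0 : Int) = (pvValM l : Int) :=
  pvValM_foldl l h 0

theorem subtract_in_usual_binary_spec : Claim_equal_subtract_in_usual_binary := by
  intro number1 number2 _ hpre
  unfold Pre_subtract_in_usual_binary at hpre
  rw [Bool.and_eq_true, List.all_eq_true, List.all_eq_true] at hpre
  have h1 : ∀ c ∈ number1.toList, pvBinary c := fun c hc => by
    have := hpre.1 c hc; simpa [pvBinary] using this
  have h2 : ∀ c ∈ number2.toList, pvBinary c := fun c hc => by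
    have := hpre.2 c hc; simpa [pvBinary] using this
  unfold Spec_subtract_in_usual_binary
  simp only [subtract_in_usual_binary, subtract_in_usual_binary_alt]
  set l1 := number1.toList with hl1
  set l2 := number2.toList with hl2
  set m := max l1.length l2.length with hm
  set b1 := List.replicate (m - l1.length) '0' ++ l1 with hb1def
  set b2 := List.replicate (m - l2.length) '0' ++ l2 with hb2def
  have hz1 : PySem.Chars.zfill l1 (m : Int) = b1 := pvZfill_eq l1 h1 m
  have hz2 : PySem.Chars.zfill l2 (m : Int) = b2 := pvZfill_eq l2 h2 m
  have hpb1 : ∀ c ∈ b1, pvBinary c := by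
    intro c hc
    rcases List.mem_append.1 hc with hc | hc
    · left; exact List.eq_of_mem_replicate hc
    · exact h1 c hc
  have hpb2 : ∀ c ∈ b2, pvBinary c := by
    intro c hc
    rcases List.mem_append.1 hc with hc | hc
    · left; exact List.eq_of_mem_replicate hc
    · exact h2 c hc
  have hlen1 : b1.length = m := by simp [hb1def]; omega
  have hlen2 : b2.length = m := by simp [hb2def]; omega
  rw [hz1, hz2]
  set zs := List.zip b1.reverse b2.reverse with hzs
  have hfst : zs.map Prod.fst = b1.reverse := List.map_fst_zip (by simp [hlen1, hlen2])
  have hsnd : zs.map Prod.snd = b2.reverse := List.map_snd_zip (by simp [hlen1, hlen2])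
  have hzlen : zs.length = m := by simp [hzs, hlen1, hlen2]
  have hzb : ∀ p ∈ zs, pvBinary p.1 ∧ pvBinary p.2 := by
    intro p hp
    obtain ⟨hp1, hp2⟩ := List.of_mem_zip hp
    exact ⟨hpb1 _ (List.mem_reverse.1 hp1), hpb2 _ (List.mem_reverse.1 hp2)⟩
  obtain ⟨d, hd, hdb, hdv⟩ := pvSubLoop_spec zs 0 (Or.inl rfl) hzb
  have hdrb : ∀ c ∈ d.reverse, pvBinary c := fun c hc => hdb c (List.mem_reverse.1 hc)
  have hAjoin : PySem.Chars.join [] (pvSubLoop zs 0 []).reverse = d.reverse := by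
    rw [hd [], List.nil_append, ← List.map_reverse, PySem.Chars.join_nil_singletons]
  have hval1 : pvValL b1.reverse = pvValM l1 := by
    have h := pvValM_reverse b1.reverse
    rw [List.reverse_reverse] at h
    exact h.symm.trans (pvValM_replicate _ _)
  have hval2 : pvValL b2.reverse = pvValM l2 := by
    have h := pvValM_reverse b2.reverse
    rw [List.reverse_reverse] at h
    exact h.symm.trans (pvValM_replicate _ _)
  rw [hfst, hsnd, hzlen, hval1, hval2, sub_zero] at hdv
  rw [pvFoldB l1 h1, pvFoldB l2 h2]
  have hpos : (0 : Int) < 2 ^ m := by positivity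
  rw [PySem.Int.mod_eq_emod_of_pos hpos]
  have hB : ((pvValM l1 : Int) - (pvValM l2 : Int)) % 2 ^ m = (pvValL d : Int) := hdv.symm
  rw [hAjoin, pvStrip_eq _ hdrb, pvValM_reverse, hB, pvToBin_strip _ (by positivity), Int.toNat_natCast]
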